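-- pv_equiv track=rewrite | github.com/Noviru/tic-tac-toe | tictactoe.py | getPosFromIndex
-- ===== SOURCE A (Python) =====
-- board = [[None]*3, [None]*3,[None]*3]
--
-- def getPosFromIndex(index):
--     yIndex = 0
--     xIndex = 0
--     for row in board:
--         for square in row:
--             if index[0] == yIndex and index[1] == xIndex:
--                 return (index[1]*200+25,index[0]*200+25)
--             xIndex += 1
--         yIndex += 1
--         xIndex = 0
-- ===== SOURCE B (Python) =====
-- def getPosFromIndex(index):
--     if index[0] in range(3) and index[1] in range(3):
--         return (index[1]*200+25, index[0]*200+25)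
--     return None
-- ===== Notes on version B (the rewrite author's own statement) =====
-- stated objective: simpler
-- what changed: Replaces the 3x3 nested scan over the board with a closed-form formula guarded by a range-membership bounds check.
import Mathlib
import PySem

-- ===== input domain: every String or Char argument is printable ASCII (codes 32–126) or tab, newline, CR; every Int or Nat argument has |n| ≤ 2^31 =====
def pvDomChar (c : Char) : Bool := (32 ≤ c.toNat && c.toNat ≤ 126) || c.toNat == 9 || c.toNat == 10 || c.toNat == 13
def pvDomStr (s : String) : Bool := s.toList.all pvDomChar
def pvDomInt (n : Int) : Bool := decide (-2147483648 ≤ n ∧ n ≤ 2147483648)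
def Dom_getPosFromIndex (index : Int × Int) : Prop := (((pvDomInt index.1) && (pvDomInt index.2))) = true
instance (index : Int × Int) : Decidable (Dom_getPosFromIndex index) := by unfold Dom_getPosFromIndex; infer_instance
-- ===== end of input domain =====

-- B replaces A's 3×3 nested scan with a closed-form formula guarded by a bounds check (objective: simpler).

-- ===== PORT A =====
-- the module-level board: a 3×3 grid of None
def pvBoard : List (List (Option Unit)) := [[none, none, none], [none, none, none], [none, none, none]]

-- inner 'for square in row' loop: returns some result on early return, else the final xIndex
def pvInnerA (index : Int × Int) (yIndex : Int) : List (Option Unit) → Int → Option (Int × Int) ⊕ Int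
  | [], xIndex => Sum.inr xIndex
  | _ :: rest, xIndex =>
      if index.1 = yIndex ∧ index.2 = xIndex then
        Sum.inl (some (index.2 * 200 + 25, index.1 * 200 + 25))
      else
        pvInnerA index yIndex rest (xIndex + 1)

-- outer 'for row in board' loop over (yIndex, xIndex) state
def pvOuterA (index : Int × Int) : List (List (Option Unit)) → Int → Int → Option (Int × Int)
  | [], _, _ => none    -- loop ends, function falls through returning None
  | row :: rows, yIndex, xIndex =>
      match pvInnerA index yIndex row xIndex with
      | Sum.inl r => r
      | Sum.inr _ => pvOuterA index rows (yIndex + 1) 0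

def getPosFromIndex (index : Int × Int) : Option (Int × Int) :=
  pvOuterA index pvBoard 0 0

-- ===== PORT B =====
def getPosFromIndex_alt (index : Int × Int) : Option (Int × Int) :=
  if index.1 ∈ PySem.List.pyRange 0 3 1 ∧ index.2 ∈ PySem.List.pyRange 0 3 1 then
    some (index.2 * 200 + 25, index.1 * 200 + 25)
  else
    none

-- ===== PRECONDITION & SPEC =====
def Spec_getPosFromIndex (index : Int × Int) (out : Option (Int × Int)) : Prop := out = getPosFromIndex_alt index
instance (index : Int × Int) (out : Option (Int × Int)) : Decidable (Spec_getPosFromIndex index out) := by unfold Spec_getPosFromIndex; infer_instance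

-- ===== CLAIM (what is proved, stated in full; the proofs are below) =====
def Claim_equal_getPosFromIndex : Prop := ∀ (index : Int × Int), Dom_getPosFromIndex index → Spec_getPosFromIndex index (getPosFromIndex index)

-- ===== LEMMAS AND PROOFS =====

-- ===== VERDICT (by name: the statement is the Claim_ definition above) =====
theorem pyRange03 : PySem.List.pyRange 0 3 1 = [0, 1, 2] := by decide

theorem getPosFromIndex_spec : Claim_equal_getPosFromIndex := by
  intro index _
  rcases index with ⟨y, x⟩
  unfold Spec_getPosFromIndex getPosFromIndex getPosFromIndex_alt pvBoard
  simp only [pvOuterA, pvInnerA, pyRange03, List.mem_cons, List.not_mem_nil, or_false]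
  split_ifs <;> first | rfl | (exfalso; omega)
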